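-- pv_equiv track=rewrite | github.com/brunorijsman/euler-problems-python | euler/problem145.py | solve_up_to_limit
-- ===== SOURCE A (Python) =====
-- def reverse(n):
--   rev_n = 0
--   while n > 0:
--     rev_n = 10 * rev_n + n % 10
--     n //= 10
--   return rev_n
--
-- def all_odd(n):
--   while n > 0:
--     digit = n % 10
--     if digit % 2 == 0:
--       return False
--     n //= 10
--   return True
--
-- def solve_up_to_limit(limit):
--   count = 0
--   for n in range(limit):
--     if (n % 10 != 0):          # no trailing 0 allowed
--       sum = n + reverse(n)
--       if all_odd(sum):
--         count += 1
--   return count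
-- ===== SOURCE B (Python) =====
-- def solve_up_to_limit(limit):
--   def check(n):
--     # digits of n, least significant first
--     ds = []
--     while n > 0:
--       ds.append(n % 10)
--       n //= 10
--     if not ds or ds[0] == 0:
--       return False
--     # ripple-carry add ds to its own reversal, digit by digit; every produced
--     # digit (t % 10, same parity as t) must be odd; a final carry digit is 1, odd.
--     carry = 0
--     for a, b in zip(ds, reversed(ds)):
--       t = a + b + carry
--       if t % 2 == 0:
--         return False
--       carry = t // 10
--     return True
--   count = 0
--   n = limit
--   while n > 0:
--     n -= 1
--     if check(n):
--       count += 1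
--   return count
-- ===== Notes on version B (the rewrite author's own statement) =====
-- stated objective: alternative
-- what changed: A forms reverse(n) as an integer (Horner loop), adds it to n, and re-decomposes the integer sum digit by digit to test parity; B never builds the reversed integer or the sum: it extracts n's digit list once and performs a ripple-carry addition of the list with its own reversal (zip(ds, reversed(ds))), rejecting as soon as a produced digit is even, and counts via a countdown while-loop instead of a forward range loop.
import Mathlib
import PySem

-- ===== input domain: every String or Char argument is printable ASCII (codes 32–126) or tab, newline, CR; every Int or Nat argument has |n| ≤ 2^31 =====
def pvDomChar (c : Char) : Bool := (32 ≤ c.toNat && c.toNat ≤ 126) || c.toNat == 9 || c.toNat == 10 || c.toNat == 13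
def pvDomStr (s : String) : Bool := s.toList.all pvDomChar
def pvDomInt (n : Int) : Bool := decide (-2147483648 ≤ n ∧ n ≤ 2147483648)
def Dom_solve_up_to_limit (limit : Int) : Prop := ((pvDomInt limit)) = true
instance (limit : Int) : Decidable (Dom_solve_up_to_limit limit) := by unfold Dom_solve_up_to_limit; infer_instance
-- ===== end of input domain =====

-- B never builds the reversed integer or the integer sum: it extracts n's digit list once,
-- ripple-carry adds the list to its own reversal (rejecting on the first even produced digit),
-- and counts with a countdown loop; objective: alternative.

-- ===== PORT A =====
-- reverse(n): while n > 0: rev_n = 10*rev_n + n % 10; n //= 10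
def pyReverseGo (n rev : Int) : Int :=
  if 0 < n then pyReverseGo (PySem.Int.floordiv n 10) (10 * rev + PySem.Int.mod n 10) else rev
termination_by n.toNat
decreasing_by
  rw [PySem.Int.floordiv_eq_ediv_of_pos (by norm_num : (0:Int) < 10)]; omega

def pyReverse (n : Int) : Int := pyReverseGo n 0

-- all_odd(n): while n > 0: if (n % 10) % 2 == 0: return False; n //= 10
def pyAllOdd (n : Int) : Bool :=
  if 0 < n then
    if PySem.Int.mod (PySem.Int.mod n 10) 2 == 0 then false
    else pyAllOdd (PySem.Int.floordiv n 10)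
  else true
termination_by n.toNat
decreasing_by
  rw [PySem.Int.floordiv_eq_ediv_of_pos (by norm_num : (0:Int) < 10)]; omega

def solve_up_to_limit (limit : Int) : Int :=
  (PySem.List.pyRange 0 limit 1).foldl
    (fun count n =>
      if PySem.Int.mod n 10 ≠ 0 then
        if pyAllOdd (n + pyReverse n) then count + 1 else count
      else count) 0

-- ===== PORT B =====
-- ds = []; while n > 0: ds.append(n % 10); n //= 10
def digitsGo (n : Int) (ds : List Int) : List Int :=
  if 0 < n then digitsGo (PySem.Int.floordiv n 10) (ds ++ [PySem.Int.mod n 10]) else ds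
termination_by n.toNat
decreasing_by
  rw [PySem.Int.floordiv_eq_ediv_of_pos (by norm_num : (0:Int) < 10)]; omega

def digitsB (n : Int) : List Int := digitsGo n []

-- for a, b in zip(ds, reversed(ds)): t = a + b + carry; if t % 2 == 0: return False; carry = t // 10
def rippleGo : List (Int × Int) → Int → Bool
  | [], _ => true
  | (a, b) :: rest, carry =>
      if PySem.Int.mod (a + b + carry) 2 == 0 then false
      else rippleGo rest (PySem.Int.floordiv (a + b + carry) 10)

-- check(n): digit list, trailing-zero guard, ripple-carry parity scan
def checkB (n : Int) : Bool :=
  let ds := digitsB n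
  if ds.isEmpty then false
  else if PySem.List.pyGetD ds 0 0 == 0 then false
  else rippleGo (ds.zip ds.reverse) 0

-- count = 0; n = limit; while n > 0: n -= 1; if check(n): count += 1
def countGo (n count : Int) : Int :=
  if 0 < n then countGo (n - 1) (if checkB (n - 1) then count + 1 else count) else count
termination_by n.toNat
decreasing_by omega

def solve_up_to_limit_alt (limit : Int) : Int := countGo limit 0

-- ===== PRECONDITION & SPEC =====
def Spec_solve_up_to_limit (limit : Int) (out : Int) : Prop := out = solve_up_to_limit_alt limit
instance (limit : Int) (out : Int) : Decidable (Spec_solve_up_to_limit limit out) := by unfold Spec_solve_up_to_limit; infer_instance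

-- ===== CLAIM (what is proved, stated in full; the proofs are below) =====
def Claim_equal_solve_up_to_limit : Prop := ∀ (limit : Int), Dom_solve_up_to_limit limit → Spec_solve_up_to_limit limit (solve_up_to_limit limit)

-- ===== LEMMAS AND PROOFS =====

-- value of an LSB-first digit list / of a list of digit pairs
def valL : List Int → Int
  | [] => 0
  | d :: t => d + 10 * valL t

def valP : List (Int × Int) → Int
  | [] => 0
  | (a, b) :: t => a + b + 10 * valP t

theorem digitsGo_eq (n : Int) (ds : List Int) : digitsGo n ds = ds ++ digitsB n := by
  by_cases h : 0 < n
  · rw [digitsGo, if_pos h]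
    conv_rhs => rw [digitsB, digitsGo, if_pos h]
    rw [digitsGo_eq (PySem.Int.floordiv n 10) (ds ++ [PySem.Int.mod n 10]),
        digitsGo_eq (PySem.Int.floordiv n 10) ([] ++ [PySem.Int.mod n 10])]
    simp
  · rw [digitsGo, if_neg h]
    conv_rhs => rw [digitsB, digitsGo, if_neg h]
    simp
termination_by n.toNat
decreasing_by
  all_goals (rw [PySem.Int.floordiv_eq_ediv_of_pos (by norm_num : (0:Int) < 10)]; omega)

theorem digitsB_pos {n : Int} (h : 0 < n) :
    digitsB n = PySem.Int.mod n 10 :: digitsB (PySem.Int.floordiv n 10) := by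
  conv_lhs => rw [digitsB, digitsGo, if_pos h]
  rw [digitsGo_eq]; simp

theorem digitsB_nonpos {n : Int} (h : ¬ 0 < n) : digitsB n = [] := by
  rw [digitsB, digitsGo, if_neg h]

theorem digitsB_mem {n d : Int} (hd : d ∈ digitsB n) : 0 ≤ d ∧ d < 10 := by
  by_cases h : 0 < n
  · rw [digitsB_pos h] at hd
    rcases List.mem_cons.1 hd with rfl | hd'
    · exact ⟨PySem.Int.mod_nonneg _ (by norm_num), PySem.Int.mod_lt _ (by norm_num)⟩
    · exact digitsB_mem hd'
  · rw [digitsB_nonpos h] at hd; cases hd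
termination_by n.toNat
decreasing_by
  rw [PySem.Int.floordiv_eq_ediv_of_pos (by norm_num : (0:Int) < 10)]; omega

theorem valL_digitsB {n : Int} (hn : 0 ≤ n) : valL (digitsB n) = n := by
  by_cases h : 0 < n
  · rw [digitsB_pos h, valL,
        valL_digitsB (n := PySem.Int.floordiv n 10)
          (by rw [PySem.Int.floordiv_eq_ediv_of_pos (by norm_num : (0:Int) < 10)]; omega)]
    have := PySem.Int.floordiv_mul_add_mod n 10
    omega
  · rw [digitsB_nonpos h, valL]; omega
termination_by n.toNat
decreasing_by
  rw [PySem.Int.floordiv_eq_ediv_of_pos (by norm_num : (0:Int) < 10)]; omega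

theorem valL_append (xs : List Int) (d : Int) :
    valL (xs ++ [d]) = valL xs + d * 10 ^ xs.length := by
  induction xs with
  | nil => simp [valL]
  | cons x t ih => simp [valL, ih]; ring

theorem horner_fold (ds : List Int) (acc : Int) :
    ds.foldl (fun a d => 10 * a + d) acc = acc * 10 ^ ds.length + valL ds.reverse := by
  induction ds generalizing acc with
  | nil => simp [valL]
  | cons d t ih =>
    rw [List.foldl_cons, ih, List.reverse_cons, valL_append]
    simp [pow_succ]; ring

theorem pyReverseGo_eq (n acc : Int) :
    pyReverseGo n acc = (digitsB n).foldl (fun a d => 10 * a + d) acc := by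
  by_cases h : 0 < n
  · rw [pyReverseGo, if_pos h, digitsB_pos h, List.foldl_cons,
        pyReverseGo_eq (PySem.Int.floordiv n 10)]
  · rw [pyReverseGo, if_neg h, digitsB_nonpos h, List.foldl_nil]
termination_by n.toNat
decreasing_by
  rw [PySem.Int.floordiv_eq_ediv_of_pos (by norm_num : (0:Int) < 10)]; omega

theorem pyReverse_eq (n : Int) : pyReverse n = valL (digitsB n).reverse := by
  rw [pyReverse, pyReverseGo_eq, horner_fold]; ring

theorem valP_zip (x : List Int) : ∀ (y : List Int), x.length = y.length →
    valP (x.zip y) = valL x + valL y := by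
  induction x with
  | nil => intro y h; cases y with
    | nil => simp [valP, valL]
    | cons b t => simp at h
  | cons a t ih =>
    intro y h
    cases y with
    | nil => simp at h
    | cons b u =>
      simp only [List.zip_cons_cons, valP, valL, ih u (by simpa using h)]
      ring

theorem valP_nonneg {p : List (Int × Int)}
    (hb : ∀ x ∈ p, 0 ≤ x.1 ∧ 0 ≤ x.2) : 0 ≤ valP p := by
  induction p with
  | nil => simp [valP]
  | cons x t ih =>
    obtain ⟨a, b⟩ := x
    have h1 := hb (a, b) (by simp)
    have h2 := ih (fun y hy => hb y (by simp [hy]))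
    simp only [valP]; omega

theorem valP_pos {p : List (Int × Int)}
    (hb : ∀ x ∈ p, 0 ≤ x.1 ∧ 0 ≤ x.2)
    (hl : ∀ a b, p.getLast? = some (a, b) → 1 ≤ a + b)
    (hne : p ≠ []) : 1 ≤ valP p := by
  induction p with
  | nil => exact absurd rfl hne
  | cons x t ih =>
    obtain ⟨a, b⟩ := x
    cases t with
    | nil =>
      have := hl a b (by simp)
      simp only [valP]; omega
    | cons c r =>
      have h1 := hb (a, b) (by simp)
      have h2 : 1 ≤ valP (c :: r) := by
        apply ih (fun y hy => hb y (by simp [hy])) _ (by simp)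
        intro a' b' h'
        exact hl a' b' (by rw [List.getLast?_cons_cons]; exact h')
      have hu : valP ((a, b) :: c :: r) = a + b + 10 * valP (c :: r) := rfl
      rw [hu]; omega

theorem zip_getLast? (x : List Int) : ∀ (y : List Int), x.length = y.length →
    (x.zip y).getLast? = x.getLast?.bind (fun a => y.getLast?.map (fun b => (a, b))) := by
  induction x with
  | nil => intro y h; cases y with
    | nil => simp
    | cons b u => simp at h
  | cons a t ih =>
    intro y h
    cases y with
    | nil => simp at h
    | cons b u =>
      have hlen : t.length = u.length := by simpa using h
      cases t with
      | nil =>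
        cases u with
        | nil => simp
        | cons c v => simp at hlen
      | cons c r =>
        cases u with
        | nil => simp at hlen
        | cons d v =>
          rw [List.zip_cons_cons, List.zip_cons_cons, List.getLast?_cons_cons,
              ← List.zip_cons_cons, List.getLast?_cons_cons, List.getLast?_cons_cons]
          exact ih _ hlen

theorem pyAllOdd_zero : pyAllOdd 0 = true := by
  rw [pyAllOdd]; simp

theorem pyAllOdd_one : pyAllOdd 1 = true := by
  rw [pyAllOdd]
  rw [if_pos (by norm_num)]
  rw [show PySem.Int.mod (PySem.Int.mod 1 10) 2 = 1 from by decide,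
      show PySem.Int.floordiv 1 10 = 0 from by decide]
  rw [if_neg (by decide), pyAllOdd_zero]

-- the core: ripple-carry over pair sums computes the all-odd test on the digits of the value
theorem rippleGo_eq (p : List (Int × Int)) : ∀ (c : Int),
    (∀ x ∈ p, 0 ≤ x.1 ∧ x.1 ≤ 9 ∧ 0 ≤ x.2 ∧ x.2 ≤ 9) →
    0 ≤ c → c ≤ 1 →
    (∀ a b, p.getLast? = some (a, b) → 1 ≤ a + b) →
    rippleGo p c = pyAllOdd (valP p + c) := by
  induction p with
  | nil =>
    intro c _ hc0 hc1 _
    interval_cases c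
    · simp [rippleGo, valP, pyAllOdd_zero]
    · simp [rippleGo, valP, pyAllOdd_one]
  | cons x rest ih =>
    intro c hb hc0 hc1 hl
    obtain ⟨a, b⟩ := x
    have hab := hb (a, b) (by simp)
    have ha1 : 0 ≤ a := hab.1
    have ha2 : a ≤ 9 := hab.2.1
    have hb1 : 0 ≤ b := hab.2.2.1
    have hb2 : b ≤ 9 := hab.2.2.2
    have hbrest : ∀ x ∈ rest, 0 ≤ x.1 ∧ x.1 ≤ 9 ∧ 0 ≤ x.2 ∧ x.2 ≤ 9 :=
      fun y hy => hb y (by simp [hy])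
    have hV : 0 ≤ valP rest := valP_nonneg (fun y hy => ⟨(hbrest y hy).1, (hbrest y hy).2.2.1⟩)
    have hmods : PySem.Int.mod (a + b + c) 2 = (a + b + c) % 2 :=
      PySem.Int.mod_eq_emod_of_pos (by norm_num)
    have hm : valP ((a, b) :: rest) + c = (a + b + c) + 10 * valP rest := by
      simp only [valP]; ring
    rw [hm]
    by_cases he : (a + b + c) % 2 = 0
    · -- even pair sum: ripple rejects, and the sum's digit is even
      rw [rippleGo, if_pos (by simp only [hmods, beq_iff_eq]; exact he)]
      have hmpos : 0 < (a + b + c) + 10 * valP rest := by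
        by_cases h0 : 0 < a + b + c
        · omega
        · -- a + b + c = 0: the last pair forces a positive tail value
          have hrne : rest ≠ [] := by
            rintro rfl
            have := hl a b (by simp)
            omega
          have : 1 ≤ valP rest :=
            valP_pos (fun y hy => ⟨(hbrest y hy).1, (hbrest y hy).2.2.1⟩)
              (fun a' b' h' => hl a' b' (by
                cases rest with
                | nil => exact absurd rfl hrne
                | cons z r => rw [List.getLast?_cons_cons]; exact h')) hrne
          omega
      rw [pyAllOdd, if_pos hmpos]
      have h10 : PySem.Int.mod ((a + b + c) + 10 * valP rest) 10
          = ((a + b + c) + 10 * valP rest) % 10 :=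
        PySem.Int.mod_eq_emod_of_pos (by norm_num)
      have h2 : PySem.Int.mod (((a + b + c) + 10 * valP rest) % 10) 2
          = (((a + b + c) + 10 * valP rest) % 10) % 2 :=
        PySem.Int.mod_eq_emod_of_pos (by norm_num)
      rw [if_pos (by rw [h10, h2]; simp only [beq_iff_eq]; omega)]
    · -- odd pair sum: one digit matched, recurse with the new carry
      rw [rippleGo, if_neg (by simp only [hmods, beq_iff_eq]; exact he)]
      have hmpos : 0 < (a + b + c) + 10 * valP rest := by omega
      rw [pyAllOdd, if_pos hmpos]
      have h10 : PySem.Int.mod ((a + b + c) + 10 * valP rest) 10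
          = ((a + b + c) + 10 * valP rest) % 10 :=
        PySem.Int.mod_eq_emod_of_pos (by norm_num)
      have h2 : PySem.Int.mod (((a + b + c) + 10 * valP rest) % 10) 2
          = (((a + b + c) + 10 * valP rest) % 10) % 2 :=
        PySem.Int.mod_eq_emod_of_pos (by norm_num)
      rw [if_neg (by rw [h10, h2]; simp only [beq_iff_eq]; omega)]
      have hfd' : PySem.Int.floordiv ((a + b + c) + 10 * valP rest) 10
          = (a + b + c) / 10 + valP rest := by
        rw [PySem.Int.floordiv_eq_ediv_of_pos (by norm_num : (0:Int) < 10)]; omega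
      have hfd : PySem.Int.floordiv (a + b + c) 10 = (a + b + c) / 10 :=
        PySem.Int.floordiv_eq_ediv_of_pos (by norm_num)
      rw [hfd', hfd,
          ih ((a + b + c) / 10) hbrest (by omega) (by omega)
            (fun a' b' h' => hl a' b' (by
              cases rest with
              | nil => simp at h'
              | cons z r => rw [List.getLast?_cons_cons]; exact h'))]
      congr 1; ring

theorem checkB_mod_zero {n : Int} (h : PySem.Int.mod n 10 = 0) : checkB n = false := by
  by_cases hp : 0 < n
  · simp only [checkB, digitsB_pos hp, h]
    rw [if_neg (by simp), if_pos (by simp [PySem.List.pyGetD, PySem.List.pyGet?, PySem.List.pyIdx?])]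
  · simp [checkB, digitsB_nonpos hp]

theorem checkB_mod_ne_zero {n : Int} (hn : 0 ≤ n) (h : PySem.Int.mod n 10 ≠ 0) :
    checkB n = pyAllOdd (n + pyReverse n) := by
  have hp : 0 < n := by
    rcases lt_or_eq_of_le hn with h' | h'
    · exact h'
    · exfalso; apply h; rw [← h']; decide
  have hmod0 : 0 ≤ PySem.Int.mod n 10 := PySem.Int.mod_nonneg _ (by norm_num)
  have hds : digitsB n = PySem.Int.mod n 10 :: digitsB (PySem.Int.floordiv n 10) := digitsB_pos hp
  have hlen : (digitsB n).length = (digitsB n).reverse.length := by simp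
  have hrip := rippleGo_eq ((digitsB n).zip (digitsB n).reverse) 0
    (by
      intro x hx
      have hmem := List.of_mem_zip hx
      have h1 := digitsB_mem hmem.1
      have h2 := digitsB_mem (List.mem_reverse.1 hmem.2)
      exact ⟨h1.1, by omega, h2.1, by omega⟩)
    (by norm_num) (by norm_num)
    (by
      intro a b hab
      rw [zip_getLast? _ _ hlen] at hab
      rcases h1 : (digitsB n).getLast? with _ | a'
      · rw [h1] at hab; simp at hab
      · rw [h1] at hab
        rcases h2 : (digitsB n).reverse.getLast? with _ | b'
        · rw [h2] at hab; simp at hab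
        · rw [h2] at hab
          simp only [Option.bind_some, Option.map_some, Option.some.injEq,
            Prod.mk.injEq] at hab
          obtain ⟨rfl, rfl⟩ := hab
          have ha_mem : a' ∈ digitsB n := List.mem_of_getLast? h1
          have hb_head : (digitsB n).head? = some b' := by
            rwa [List.getLast?_reverse] at h2
          have hb_eq : b' = PySem.Int.mod n 10 := by
            rw [hds] at hb_head; simpa using hb_head.symm
          have := (digitsB_mem ha_mem).1
          omega)
  simp only [checkB]
  rw [if_neg (by simp [hds]),
      if_neg (by
        simp [hds, PySem.List.pyGetD, PySem.List.pyGet?, PySem.List.pyIdx?]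
        exact fun hd => h ((PySem.Int.mod_eq_zero_iff_dvd n 10).2 hd))]
  rw [hrip, add_zero, valP_zip _ _ hlen, valL_digitsB hn, ← pyReverse_eq]

theorem countGo_eq (m : Int) : ∀ (c : Int),
    countGo m c = c + ((PySem.List.pyRange 0 m 1).countP (fun n => checkB n) : Int) := by
  by_cases h : 0 < m
  · intro c
    rw [countGo, if_pos h, countGo_eq (m - 1)]
    have hr : PySem.List.pyRange 0 m 1 = PySem.List.pyRange 0 (m - 1) 1 ++ [m - 1] := by
      have := PySem.List.pyRange_one_succ_right (a := 0) (b := m - 1) (by omega : (0:Int) ≤ m - 1)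
      simpa [sub_add_cancel] using this
    rw [hr, List.countP_append]
    by_cases hc : checkB (m - 1) <;> simp [hc] <;> try omega
  · intro c
    rw [countGo, if_neg h, PySem.List.pyRange_one_eq_nil (by omega)]
    simp
termination_by m.toNat
decreasing_by omega

theorem abody_eq {n : Int} (hn : 0 ≤ n) (c : Int) :
    (if PySem.Int.mod n 10 ≠ 0 then
        if pyAllOdd (n + pyReverse n) then c + 1 else c
      else c)
      = (if checkB n then c + 1 else c) := by
  by_cases h0 : PySem.Int.mod n 10 = 0
  · rw [if_neg (not_not_intro h0), checkB_mod_zero h0]; simp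
  · rw [if_pos h0, checkB_mod_ne_zero hn h0]

theorem afold_eq (l : List Int) (hl : ∀ x ∈ l, 0 ≤ x) : ∀ (c : Int),
    l.foldl
      (fun count n =>
        if PySem.Int.mod n 10 ≠ 0 then
          if pyAllOdd (n + pyReverse n) then count + 1 else count
        else count) c
      = c + (l.countP (fun n => checkB n) : Int) := by
  induction l with
  | nil => simp
  | cons x t ih =>
    intro c
    rw [List.foldl_cons, abody_eq (hl x (by simp)) c,
        ih (fun y hy => hl y (by simp [hy]))]
    by_cases hc : checkB x <;> simp [hc] <;> try omega

-- ===== VERDICT (by name: the statement is the Claim_ definition above) =====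
theorem solve_up_to_limit_spec : Claim_equal_solve_up_to_limit := by
  intro limit _
  unfold Spec_solve_up_to_limit solve_up_to_limit solve_up_to_limit_alt
  rw [afold_eq _ (fun x hx => ((PySem.List.mem_pyRange_one).1 hx).1), countGo_eq]
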